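-- pv_equiv track=rewrite | github.com/deepakkt/codility-training-python | 007-stacks-and-queues/codility-stacks-and-queues-2-fish.py | solution
-- ===== SOURCE A (Python) =====
-- def solution(A, B):
--     # write your code in Python 3.6
--     # reformat the input to incorporate the size of the fish as well
--     b_repr = [
--         {'size': A[idx], 'dir': n} for (idx, n) in enumerate(B)
--     ]
--
--     fish_stack = []
--
--     while True:
--         for fish in b_repr:
--             if not fish_stack:
--                 fish_stack.append(fish)
--                 continue
--
--             if fish['dir'] == 1:
--                 fish_stack.append(fish)
--                 continue
--
--             if fish['dir'] == 0:
--                 if fish_stack[-1]['dir'] == 0: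
--                     fish_stack.append(fish)
--                     continue
--
--                 if fish_stack[-1]['size'] > fish['size']:
--                     continue
--
--                 try:
--                     # keep removing all downstream fish as long as the current
--                     # upstream fish is larger than them
--                     while fish_stack[-1]['dir'] == 1 and fish_stack[-1]['size'] < fish['size']:
--                         fish_stack.pop()
--                 except IndexError:
--                     pass
--
--                 fish_stack.append(fish)
--
--         # decide if you want to make another pass
--         # if the fish flow is unchanged then exit
--         if fish_stack == b_repr:
--             break
--
--         # make another pass
--         b_repr = fish_stack[:]
--         fish_stack = []
--
--     return len(fish_stack)
-- ===== SOURCE B (Python) =====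
-- def solution(A, B):
--     # Single scan with a stack of still-alive fish (top = most recent).
--     # A downstream fish (dir 1) waits on the stack; an upstream fish (dir 0)
--     # eats every smaller downstream fish on top of it, then survives unless the
--     # fish it stops at is a strictly larger non-upstream fish; a fish with any
--     # other direction value only survives as the leading fish.
--     stack = []
--     for size, d in zip(A, B):
--         if not stack:
--             stack.append((size, d))
--         elif d == 1:
--             stack.append((size, d))
--         elif d == 0:
--             while stack and stack[-1][1] == 1 and stack[-1][0] < size:
--                 stack.pop()
--             if stack and stack[-1][1] != 0 and stack[-1][0] > size:
--                 pass  # eaten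
--             else:
--                 stack.append((size, d))
--         # any other direction value: the fish drifts away
--     return len(stack)
-- ===== Notes on version B (the rewrite author's own statement) =====
-- stated objective: faster
-- what changed: A repeatedly re-runs a (partially incorrect) collision pass over the whole fish list until it reaches a fixpoint; B resolves all collisions in one left-to-right scan with a stack where each upstream fish pops smaller downstream fish and survives unless stopped by a larger non-upstream fish.
import Mathlib
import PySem

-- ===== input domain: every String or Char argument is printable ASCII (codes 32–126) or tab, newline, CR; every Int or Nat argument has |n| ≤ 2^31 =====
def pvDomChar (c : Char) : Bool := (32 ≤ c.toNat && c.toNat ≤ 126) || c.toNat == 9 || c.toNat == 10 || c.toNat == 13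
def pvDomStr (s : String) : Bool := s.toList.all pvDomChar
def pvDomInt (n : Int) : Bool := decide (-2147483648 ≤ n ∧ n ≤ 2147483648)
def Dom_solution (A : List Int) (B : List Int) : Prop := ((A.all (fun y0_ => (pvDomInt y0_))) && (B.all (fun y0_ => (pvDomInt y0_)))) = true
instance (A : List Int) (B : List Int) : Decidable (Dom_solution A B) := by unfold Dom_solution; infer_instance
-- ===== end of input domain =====

-- B replaces A's iterate-a-pass-until-fixpoint collision simulation by a single
-- left-to-right stack scan (asymptotically faster).


-- ===== PORT A =====
-- A fish is (size, dir).  The Python stack grows at the right end; we represent it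
-- with the list head as the stack top (push/pop at the head), same algorithm.

-- the inner 'while fish_stack[-1]['dir'] == 1 and fish_stack[-1]['size'] < fish['size']: pop'
-- (the caught IndexError on the empty stack is the [] case)
def popA (f : Int × Int) : List (Int × Int) → List (Int × Int)
  | [] => []
  | g :: rest => if g.2 = 1 ∧ g.1 < f.1 then popA f rest else g :: rest

-- the body of 'for fish in b_repr', branches in Python order
def stepA (st : List (Int × Int)) (f : Int × Int) : List (Int × Int) :=
  match st with
  | [] => [f]
  | g :: _ =>
    if f.2 = 1 then f :: st
    else if f.2 = 0 then
      if g.2 = 0 then f :: st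
      else if g.1 > f.1 then st
      else f :: popA f st
    else st

-- one full pass over b_repr; .reverse converts back to Python's left-to-right order
def passA (b : List (Int × Int)) : List (Int × Int) := (b.foldl stepA []).reverse

-- termination facts for the 'while True' loop: a pass yields a sublist of its input
theorem popA_sublist (f : Int × Int) : ∀ st : List (Int × Int), (popA f st).Sublist st
  | [] => List.Sublist.refl []
  | g :: rest => by
      by_cases h : g.2 = 1 ∧ g.1 < f.1
      · simpa [popA, h] using ((popA_sublist f rest).trans (List.sublist_cons_self g rest))
      · simp [popA, h]

theorem stepA_shape (st : List (Int × Int)) (f : Int × Int) :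
    stepA st f = f :: st ∨ stepA st f = st ∨ stepA st f = f :: popA f st := by
  cases st with
  | nil => left; rfl
  | cons g st' =>
      simp only [stepA]
      split_ifs <;> simp

theorem stepA_rev_sublist (st : List (Int × Int)) (f : Int × Int) :
    (stepA st f).reverse.Sublist (st.reverse ++ [f]) := by
  rcases stepA_shape st f with h | h | h <;> rw [h]
  · simp
  · exact List.sublist_append_left st.reverse [f]
  · simpa using ((popA_sublist f st).reverse.append_right [f])

theorem foldl_stepA_sublist :
    ∀ (l st : List (Int × Int)), (l.foldl stepA st).reverse.Sublist (st.reverse ++ l)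
  | [], st => by simp
  | f :: l, st => by
      have h1 := foldl_stepA_sublist l (stepA st f)
      have h2 := (stepA_rev_sublist st f).append_right l
      rw [List.foldl_cons]
      refine h1.trans ?_
      simpa using h2

theorem passA_sublist (b : List (Int × Int)) : (passA b).Sublist b := by
  simpa [passA] using foldl_stepA_sublist b []

-- the 'while True: … if fish_stack == b_repr: break; b_repr = fish_stack[:]' loop
def loopA (b : List (Int × Int)) : Int :=
  if _h : passA b = b then (b.length : Int) else loopA (passA b)
termination_by b.length
decreasing_by
  exact Nat.lt_of_le_of_ne (passA_sublist b).length_le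
    (fun hl => _h ((passA_sublist b).eq_of_length hl))

def solution (A : List Int) (B : List Int) : Int :=
  -- b_repr = [{'size': A[idx], 'dir': n} for (idx, n) in enumerate(B)]
  loopA ((PySem.List.enumerate B 0).map (fun p => (PySem.List.pyGetD A p.1 0, p.2)))

-- ===== PORT B =====
-- the 'while stack and stack[-1][1] == 1 and stack[-1][0] < size: pop' loop fused
-- with the trailing eaten-check and push of one upstream fish
def fightB (f : Int × Int) : List (Int × Int) → List (Int × Int)
  | [] => [f]
  | g :: rest =>
      if g.2 = 1 ∧ g.1 < f.1 then fightB f rest          -- pop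
      else if g.2 ≠ 0 ∧ g.1 > f.1 then g :: rest         -- eaten
      else f :: g :: rest                                  -- push

-- the body of 'for size, d in zip(A, B)'
def stepB (st : List (Int × Int)) (f : Int × Int) : List (Int × Int) :=
  match st with
  | [] => [f]
  | _ :: _ =>
    if f.2 = 1 then f :: st
    else if f.2 = 0 then fightB f st
    else st

def solution_alt (A : List Int) (B : List Int) : Int :=
  (((A.zip B).foldl stepB []).length : Int)

-- ===== PRECONDITION & SPEC =====
-- Pre_ excludes exactly the inputs where A raises: len(B) > len(A) makes A's
-- comprehension evaluate A[idx] out of range (IndexError).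
def Pre_solution (A : List Int) (B : List Int) : Prop := B.length ≤ A.length
instance (A : List Int) (B : List Int) : Decidable (Pre_solution A B) := by
  unfold Pre_solution; infer_instance

def pvWitness_solution : List Int × List Int := ([4, 8, 2, 6, 9], [0, 1, 0, 0, 0])

def Spec_solution (A : List Int) (B : List Int) (out : Int) : Prop := out = solution_alt A B
instance (A : List Int) (B : List Int) (out : Int) : Decidable (Spec_solution A B out) := by
  unfold Spec_solution; infer_instance

-- ===== CLAIM (what is proved, stated in full; the proofs are below) =====
def Claim_equal_solution : Prop :=
  ∀ (A : List Int) (B : List Int), Dom_solution A B → Pre_solution A B →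
    Spec_solution A B (solution A B)
-- ===== LEMMAS AND PROOFS =====

-- stack invariant: only the bottom element may carry a direction outside {0,1}
def Wd (st : List (Int × Int)) : Prop := ∀ x ∈ st.dropLast, x.2 = 0 ∨ x.2 = 1

-- run B's scan on a list (proof-side name for B's fold)
def runB (l : List (Int × Int)) : List (Int × Int) := l.foldl stepB []

theorem stepB_ne_nil (st : List (Int × Int)) (f : Int × Int) : stepB st f ≠ [] := by
  cases st with
  | nil => simp [stepB]
  | cons g st' =>
    have hf : ∀ (x : List (Int × Int)) (h : Int × Int), fightB h x ≠ [] := by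
      intro x h
      induction x with
      | nil => simp [fightB]
      | cons y ys ih =>
        rw [fightB]
        split_ifs <;> simp [ih]
    rw [stepB]
    split_ifs <;> simp [hf]

theorem runB_ne_nil (l : List (Int × Int)) (h : l ≠ []) : runB l ≠ [] := by
  induction l using List.reverseRecOn with
  | nil => exact absurd rfl h
  | append_singleton xs x _ =>
    rw [runB, List.foldl_append, List.foldl_cons, List.foldl_nil]
    exact stepB_ne_nil _ x

theorem runB_append_singleton (x : List (Int × Int)) (g : Int × Int) :
    runB (x ++ [g]) = stepB (runB x) g := by
  simp [runB, List.foldl_append]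

theorem stepB_one (τ : List (Int × Int)) (g : Int × Int) (hg : g.2 = 1) :
    stepB τ g = g :: τ := by
  cases τ with
  | nil => rfl
  | cons y ys => rw [stepB, if_pos hg]

theorem stepB_zero (τ : List (Int × Int)) (f : Int × Int) (hf : f.2 = 0) :
    stepB τ f = fightB f τ := by
  cases τ with
  | nil => rfl
  | cons y ys => rw [stepB, if_neg (by rw [hf]; decide), if_pos hf]

theorem stepB_weird (τ : List (Int × Int)) (f : Int × Int)
    (hτ : τ ≠ []) (h1 : ¬ f.2 = 1) (h0 : ¬ f.2 = 0) : stepB τ f = τ := by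
  cases τ with
  | nil => exact absurd rfl hτ
  | cons y ys => rw [stepB, if_neg h1, if_neg h0]

theorem runB_rev_cons (g : Int × Int) (st' : List (Int × Int)) (hg : g.2 = 1) :
    runB (g :: st').reverse = g :: runB st'.reverse := by
  rw [List.reverse_cons, runB_append_singleton, stepB_one _ _ hg]

theorem fight_pop (f : Int × Int) :
    ∀ st : List (Int × Int), fightB f (runB (popA f st).reverse) = fightB f (runB st.reverse)
  | [] => rfl
  | g :: st' => by
      by_cases h : g.2 = 1 ∧ g.1 < f.1
      · rw [popA, if_pos h, fight_pop f st', runB_rev_cons g st' h.1, fightB,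
          if_pos h]
      · rw [popA, if_neg h]

theorem wd_tail {g : Int × Int} {st : List (Int × Int)} (h : Wd (g :: st)) : Wd st := by
  intro x hx
  cases st with
  | nil => cases hx
  | cons a l =>
    exact h x (by rw [List.dropLast_cons₂]; exact List.mem_cons_of_mem g hx)

theorem wd_cons {f : Int × Int} {st : List (Int × Int)}
    (hf : f.2 = 0 ∨ f.2 = 1) (h : Wd st) : Wd (f :: st) := by
  intro x hx
  cases st with
  | nil => cases hx
  | cons a l =>
    rw [List.dropLast_cons₂] at hx
    rcases List.mem_cons.mp hx with rfl | hx'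
    · exact hf
    · exact h x hx'

theorem wd_popA (f : Int × Int) :
    ∀ {st : List (Int × Int)}, Wd st → Wd (popA f st)
  | [], _ => by intro x hx; cases hx
  | g :: st', h => by
      by_cases hc : g.2 = 1 ∧ g.1 < f.1
      · rw [popA, if_pos hc]; exact wd_popA f (wd_tail h)
      · rw [popA, if_neg hc]; exact h

theorem wd_stepA {st : List (Int × Int)} (f : Int × Int) (h : Wd st) : Wd (stepA st f) := by
  cases st with
  | nil => intro x hx; cases hx
  | cons g st' =>
    rw [stepA]
    split_ifs with h1 h2 h3 h4
    · exact wd_cons (Or.inr h1) h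
    · exact wd_cons (Or.inl h2) h
    · exact h
    · exact wd_cons (Or.inl h2) (wd_popA f h)
    · exact h

theorem wd_bottom {g : Int × Int} {st : List (Int × Int)}
    (h : Wd (g :: st)) (hg1 : ¬ g.2 = 1) (hg0 : ¬ g.2 = 0) : st = [] := by
  cases st with
  | nil => rfl
  | cons a l =>
    exact absurd (h g (by rw [List.dropLast_cons₂]; exact List.mem_cons_self ..))
      (by rintro (h' | h') <;> [exact hg0 h'; exact hg1 h'])

-- one A-step commutes with B's scan of the (reversed) stack
theorem step_main (st : List (Int × Int)) (f : Int × Int) (hW : Wd st) :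
    runB (stepA st f).reverse = stepB (runB st.reverse) f := by
  cases st with
  | nil => rfl
  | cons g st' =>
    have hσ : runB (g :: st').reverse ≠ [] := runB_ne_nil _ (by simp)
    by_cases hf1 : f.2 = 1
    · rw [stepA, if_pos hf1, List.reverse_cons, runB_append_singleton]
    · by_cases hf0 : f.2 = 0
      · by_cases hg : g.2 = 0
        · rw [stepA, if_neg hf1, if_pos hf0, if_pos hg, List.reverse_cons,
            runB_append_singleton]
        · by_cases hgt : g.1 > f.1
          · -- the upstream fish is eaten
            rw [stepA, if_neg hf1, if_pos hf0, if_neg hg, if_pos hgt,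
              stepB_zero _ _ hf0]
            by_cases hg1 : g.2 = 1
            · rw [runB_rev_cons g st' hg1, fightB,
                if_neg (by rintro ⟨_, h⟩; omega), if_pos ⟨by omega, hgt⟩]
            · have hst' : st' = [] := wd_bottom hW hg1 hg
              subst hst'
              have : runB [g].reverse = [g] := by
                simp [runB, stepB]
              rw [this, fightB, if_neg (by rintro ⟨h', _⟩; exact hg1 h'),
                if_pos ⟨hg, hgt⟩]
          · -- pop smaller downstream fish, then push
            rw [stepA, if_neg hf1, if_pos hf0, if_neg hg, if_neg hgt,
              List.reverse_cons, runB_append_singleton, stepB_zero _ _ hf0,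
              stepB_zero _ _ hf0, fight_pop f (g :: st')]
      · -- fish with a direction outside {0,1} is dropped (stack nonempty)
        rw [stepA, if_neg hf1, if_neg hf0, stepB_weird _ _ hσ hf1 hf0]

theorem foldl_inv :
    ∀ (l st : List (Int × Int)), Wd st →
      runB (l.foldl stepA st).reverse = l.foldl stepB (runB st.reverse)
  | [], st, _ => rfl
  | f :: l, st, hW => by
      rw [List.foldl_cons, List.foldl_cons,
        foldl_inv l (stepA st f) (wd_stepA f hW), step_main st f hW]

theorem pass_runB (b : List (Int × Int)) : runB (passA b) = runB b := by
  have h := foldl_inv b [] (by intro x hx; cases hx)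
  simpa [passA, runB] using h

theorem push_lemma (st : List (Int × Int)) (f : Int × Int)
    (h : stepA st f = f :: st) : stepB st f = f :: st := by
  cases st with
  | nil => rfl
  | cons g st' =>
    by_cases hf1 : f.2 = 1
    · rw [stepB, if_pos hf1]
    · by_cases hf0 : f.2 = 0
      · by_cases hg : g.2 = 0
        · rw [stepB, if_neg hf1, if_pos hf0, fightB,
            if_neg (by rintro ⟨h', _⟩; rw [hg] at h'; cases h'),
            if_neg (by rintro ⟨h', _⟩; exact h' hg)]
        · have hngt : ¬ g.1 > f.1 := by
            intro hgt
            have heq : stepA (g :: st') f = g :: st' := by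
              rw [stepA, if_neg hf1, if_pos hf0, if_neg hg, if_pos hgt]
            have := congrArg List.length (heq.symm.trans h)
            simp at this
          have heq : stepA (g :: st') f = f :: popA f (g :: st') := by
            rw [stepA, if_neg hf1, if_pos hf0, if_neg hg, if_neg hngt]
          have h4 : popA f (g :: st') = g :: st' := by
            have h2 := heq.symm.trans h
            injection h2
          have hnpop : ¬ (g.2 = 1 ∧ g.1 < f.1) := by
            intro hc
            rw [popA, if_pos hc] at h4
            have hlen2 : (popA f st').length ≤ st'.length := (popA_sublist f st').length_le
            have := congrArg List.length h4
            simp at this; omega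
          rw [stepB, if_neg hf1, if_pos hf0, fightB, if_neg hnpop,
            if_neg (by rintro ⟨_, h'⟩; exact hngt h')]
      · exfalso
        have heq : stepA (g :: st') f = g :: st' := by
          rw [stepA, if_neg hf1, if_neg hf0]
        have := congrArg List.length (heq.symm.trans h)
        simp at this

-- a passA-fixpoint is exactly a B-stable configuration
theorem fix_runB (b : List (Int × Int)) (h : passA b = b) :
    runB b = b.reverse := by
  induction b using List.reverseRecOn with
  | nil => rfl
  | append_singleton c f ih =>
    set st := c.foldl stepA [] with hst_def
    have hstep : stepA st f = f :: c.reverse := by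
      have h1 : (stepA st f).reverse = c ++ [f] := by
        simpa [passA, List.foldl_append, hst_def] using h
      have h2 : stepA st f = (c ++ [f]).reverse := by
        rw [← h1, List.reverse_reverse]
      simpa using h2
    have hsub : st.reverse.Sublist c := by simpa using foldl_stepA_sublist c []
    have hlen : st.length ≤ c.length := by simpa using hsub.length_le
    have hst_eq : st = c.reverse := by
      rcases stepA_shape st f with h3 | h3 | h3
      · have h4 : f :: st = f :: c.reverse := h3.symm.trans hstep
        injection h4
      · exfalso
        have h4 : st = f :: c.reverse := h3.symm.trans hstep
        have := congrArg List.length h4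
        simp at this; omega
      · have h4 : f :: popA f st = f :: c.reverse := h3.symm.trans hstep
        have h5 : popA f st = c.reverse := by injection h4
        have h6 : (popA f st).length ≤ st.length := (popA_sublist f st).length_le
        have h7 : st.length = (popA f st).length := by
          have : (popA f st).length = c.length := by rw [h5]; simp
          omega
        have h8 := (popA_sublist f st).eq_of_length h7.symm
        rw [h8] at h5; exact h5
    have hpassc : passA c = c := by
      rw [passA, ← hst_def, hst_eq, List.reverse_reverse]
    have hrunc : runB c = c.reverse := ih hpassc
    have hpush : stepB st f = f :: st :=
      push_lemma st f (by rw [hstep, hst_eq])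
    rw [runB_append_singleton, hrunc, ← hst_eq, hpush, hst_eq]
    simp

theorem loopA_eq (b : List (Int × Int)) :
    loopA b = ((runB b).length : Int) := by
  induction b using loopA.induct with
  | case1 b h =>
    rw [loopA, dif_pos h, fix_runB b h]
    simp
  | case2 b h ih =>
    rw [loopA, dif_neg h, ih, pass_runB b]

theorem init_eq :
    ∀ (B A pre : List Int), B.length ≤ A.length →
      (PySem.List.enumerate B (pre.length : Int)).map
        (fun p => (PySem.List.pyGetD (pre ++ A) p.1 0, p.2)) = A.zip B
  | [], A, pre, _ => by simp [PySem.List.enumerate]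
  | b :: B', A, pre, h => by
      cases A with
      | nil => simp at h
      | cons a A' =>
        rw [PySem.List.enumerate_cons, List.map_cons]
        have h1 : PySem.List.pyGetD (pre ++ a :: A') ((pre.length : Nat) : Int) 0 = a := by
          rw [PySem.List.pyGetD_natCast]
          simp [List.getD_eq_getElem?_getD]
        have h2 : (pre.length : Int) + 1 = ((pre ++ [a]).length : Int) := by
          simp
        have h3 : pre ++ a :: A' = (pre ++ [a]) ++ A' := by simp
        rw [h1, h2, h3, init_eq B' A' (pre ++ [a]) (by simpa using Nat.le_of_succ_le_succ h)]
        simp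

-- ===== VERDICT (by name: the statement is the Claim_ definition above) =====
theorem solution_spec : Claim_equal_solution := by
  intro A B _ hpre
  unfold Spec_solution solution solution_alt
  have hi : (PySem.List.enumerate B 0).map
      (fun p => (PySem.List.pyGetD A p.1 0, p.2)) = A.zip B := by
    simpa using init_eq B A [] hpre
  rw [hi, loopA_eq (A.zip B)]
  rfl
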